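-- pv_equiv track=rewrite | github.com/MrBrantCode/unitest_baseline | mut_generate/mist_train_taco/taco_9023/solution.py | count_strictly_increasing_sequences
-- ===== SOURCE A (Python) =====
-- def count_strictly_increasing_sequences(s: str) -> int:
--     MOD = 10**9 + 7
--     prev = None
--     base_a = 0
--     a_count = 0
--     seq_count = 0
--
--     for i in range(len(s) - 1, -1, -1):
--         if s[i] == 'a':
--             seq_count += 1
--             seq_count += base_a
--             a_count += 1
--         elif s[i] == 'b' and prev != 'b':
--             base_a = seq_count
--             a_count = 0
--         prev = s[i]
--
--     return seq_count % MOD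
-- ===== SOURCE B (Python) =====
-- def count_strictly_increasing_sequences(s: str) -> int:
--     MOD = 10**9 + 7
--     # Phase 1: run-length encoding of reversed(s), built by prepending while scanning s forward.
--     rs = []
--     for c in s:
--         if rs and rs[0][0] == c:
--             rs[0] = (c, rs[0][1] + 1)
--         else:
--             rs.insert(0, (c, 1))
--     # Phase 2: one closed-form step per run.
--     seq = 0
--     base = 0
--     for c, n in rs:
--         if c == 'a':
--             seq += n * (1 + base)
--         elif c == 'b':
--             base = seq
--     return seq % MOD
-- ===== Notes on version B (the rewrite author's own statement) =====
-- stated objective: alternative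
-- what changed: Replaces the backward index loop with prev/a_count sentinel state by a two-phase algorithm: a forward scan that run-length-encodes reversed(s) by prepending, then one closed-form step per run (n*(1+base) for an 'a'-run, base=seq once per 'b'-run), dropping prev and the unused a_count.
import Mathlib
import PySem

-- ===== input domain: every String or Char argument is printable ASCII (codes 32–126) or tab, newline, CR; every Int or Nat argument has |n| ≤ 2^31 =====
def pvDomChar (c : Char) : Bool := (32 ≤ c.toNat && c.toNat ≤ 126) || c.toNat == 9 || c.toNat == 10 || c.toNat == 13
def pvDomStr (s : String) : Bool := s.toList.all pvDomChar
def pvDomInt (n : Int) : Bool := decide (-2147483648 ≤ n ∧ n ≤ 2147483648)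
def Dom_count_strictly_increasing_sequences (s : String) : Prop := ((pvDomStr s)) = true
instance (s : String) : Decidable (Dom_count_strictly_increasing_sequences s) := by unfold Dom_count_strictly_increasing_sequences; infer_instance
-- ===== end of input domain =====

-- B replaces A's backward index loop with prev/a_count state by run-length encoding + one closed-form step per run (alternative decomposition, same cost).

-- ===== PORT A =====
-- state: (prev, base_a, a_count, seq_count)
def pvStepA (st : Option Char × Int × Int × Int) (c : Char) : Option Char × Int × Int × Int :=
  let (prev, base_a, a_count, seq_count) := st
  if c = 'a' then (some c, base_a, a_count + 1, seq_count + 1 + base_a)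
  else if c = 'b' ∧ prev ≠ some 'b' then (some c, seq_count, 0, seq_count)
  else (some c, base_a, a_count, seq_count)

def count_strictly_increasing_sequences (s : String) : Int :=
  let st := (PySem.List.pyRange (PySem.Str.len s - 1) (-1) (-1)).foldl
    (fun st i =>
      match PySem.Str.pyGet? s i with
      | some c => pvStepA st c
      | none => st)   -- unreachable: every i in range(len(s)-1,-1,-1) is a valid index
    (none, 0, 0, 0)
  PySem.Int.mod st.2.2.2 (10 ^ 9 + 7)

-- ===== PORT B =====
-- one step of phase 1: prepend c to the run list, merging with the first run if it has the same char
def pvPushRun (rs : List (Char × Int)) (c : Char) : List (Char × Int) :=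
  match rs with
  | (d, n) :: t => if c = d then (c, n + 1) :: t else (c, 1) :: (d, n) :: t
  | [] => [(c, 1)]

-- one step of phase 2
def pvStepB (st : Int × Int) (run : Char × Int) : Int × Int :=
  let (base, seq) := st
  let (c, n) := run
  if c = 'a' then (base, seq + n * (1 + base))
  else if c = 'b' then (seq, seq)
  else (base, seq)

def count_strictly_increasing_sequences_alt (s : String) : Int :=
  let rs := s.toList.foldl pvPushRun []
  let st := rs.foldl pvStepB (0, 0)
  PySem.Int.mod st.2 (10 ^ 9 + 7)

-- ===== PRECONDITION & SPEC =====
def Spec_count_strictly_increasing_sequences (s : String) (out : Int) : Prop := out = count_strictly_increasing_sequences_alt s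
instance (s : String) (out : Int) : Decidable (Spec_count_strictly_increasing_sequences s out) := by unfold Spec_count_strictly_increasing_sequences; infer_instance

-- ===== CLAIM (what is proved, stated in full; the proofs are below) =====
def Claim_equal_count_strictly_increasing_sequences : Prop := ∀ (s : String), Dom_count_strictly_increasing_sequences s → Spec_count_strictly_increasing_sequences s (count_strictly_increasing_sequences s)

-- ===== LEMMAS AND PROOFS =====

-- rle l = run-length encoding of l (structural form of phase 1)
def pvRle : List Char → List (Char × Int)
  | [] => []
  | c :: rest => pvPushRun (pvRle rest) c

lemma pvPushRun_head (rs : List (Char × Int)) (c : Char) :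
    ((pvPushRun rs c).head?).map Prod.fst = some c := by
  cases rs with
  | nil => rfl
  | cons p t => obtain ⟨d, n⟩ := p; by_cases h : c = d <;> simp [pvPushRun, h]

lemma pvRle_head (l : List Char) :
    ((pvRle l).head?).map Prod.fst = l.head? := by
  cases l with
  | nil => rfl
  | cons c rest => simp [pvRle, pvPushRun_head]

-- phase 1 as a foldl equals the structural rle of the reverse
lemma pvFoldl_pushRun (l : List Char) :
    l.foldl pvPushRun [] = pvRle l.reverse := by
  induction l using List.reverseRecOn with
  | nil => rfl
  | append_singleton l x ih => simp [pvRle, ih]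

-- case lemmas for A's step
lemma pvStepA_a (p : Option Char) (b a q : Int) :
    pvStepA (p, b, a, q) 'a' = (some 'a', b, a + 1, q + 1 + b) := by
  simp [pvStepA]

lemma pvStepA_b_fire (p : Option Char) (b a q : Int) (hp : p ≠ some 'b') :
    pvStepA (p, b, a, q) 'b' = (some 'b', q, 0, q) := by
  simp [pvStepA, hp]

lemma pvStepA_b_skip (b a q : Int) :
    pvStepA (some 'b', b, a, q) 'b' = (some 'b', b, a, q) := by
  simp [pvStepA]

lemma pvStepA_other (p : Option Char) (b a q : Int) (c : Char)
    (ha : c ≠ 'a') (hb : c ≠ 'b') :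
    pvStepA (p, b, a, q) c = (some c, b, a, q) := by
  simp [pvStepA, ha, hb]

-- case lemmas for B's step
lemma pvStepB_a (b q n : Int) :
    pvStepB (b, q) ('a', n) = (b, q + n * (1 + b)) := by
  simp [pvStepB]

lemma pvStepB_b (b q n : Int) :
    pvStepB (b, q) ('b', n) = (q, q) := by
  simp [pvStepB]

lemma pvStepB_other (b q n : Int) (c : Char) (ha : c ≠ 'a') (hb : c ≠ 'b') :
    pvStepB (b, q) (c, n) = (b, q) := by
  simp [pvStepB, ha, hb]

-- A's index loop over range(len-1,-1,-1) with s[i] equals a fold over the reversed character list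
lemma pvIndexLoop (l : List Char) (init : Option Char × Int × Int × Int) :
    (PySem.List.pyRange ((l.length : Int) - 1) (-1) (-1)).foldl
      (fun st i => match PySem.List.pyGet? l i with
        | some c => pvStepA st c
        | none => st) init
      = l.reverse.foldl pvStepA init := by
  induction l using List.reverseRecOn generalizing init with
  | nil => rfl
  | append_singleton l x ih =>
    have hlen : ((l ++ [x]).length : Int) - 1 = (l.length : Int) := by
      simp
    rw [hlen]
    rw [PySem.List.pyRange_neg_one_cons (by omega : (-1 : Int) < (l.length : Int))]
    simp only [List.foldl_cons]
    rw [PySem.List.pyGet?_append_length]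
    have hcongr :
        (PySem.List.pyRange ((l.length : Int) - 1) (-1) (-1)).foldl
          (fun st i => match PySem.List.pyGet? (l ++ [x]) i with
            | some c => pvStepA st c
            | none => st) (pvStepA init x)
        = (PySem.List.pyRange ((l.length : Int) - 1) (-1) (-1)).foldl
          (fun st i => match PySem.List.pyGet? l i with
            | some c => pvStepA st c
            | none => st) (pvStepA init x) := by
      apply PySem.List.foldl_congr_mem
      intro st i hi
      have hmem := (PySem.List.mem_pyRange_neg_one).1 hi
      have h0 : 0 ≤ i := by omega
      have hlt : i.toNat < l.length := by omega
      have : PySem.List.pyGet? (l ++ [x]) i = PySem.List.pyGet? l i := by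
        rw [PySem.List.pyGet?_of_nonneg _ h0, PySem.List.pyGet?_of_nonneg _ h0,
          List.getElem?_append_left hlt]
      rw [this]
    rw [hcongr, ih]
    simp

-- the heart: A's per-character fold agrees with B's per-run fold
lemma pvMain : ∀ (rl : List Char) (p0 : Option Char) (b0 a0 q0 : Int),
    ((p0 = some 'b' ∧ rl.head? = some 'b') → b0 = q0) →
    ((rl.foldl pvStepA (p0, b0, a0, q0)).2.1, (rl.foldl pvStepA (p0, b0, a0, q0)).2.2.2)
      = (pvRle rl).foldl pvStepB (b0, q0) := by
  intro rl
  induction rl with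
  | nil => intro _ _ _ _ _; rfl
  | cons c rest ih =>
    intro p0 b0 a0 q0 hH
    simp only [List.foldl_cons, pvRle]
    have hhead := pvRle_head rest
    rcases hrle : pvRle rest with _ | ⟨⟨d, n⟩, t⟩
    · -- rest has no runs, i.e. rest = []
      have hrest : rest = [] := by
        rcases rest with _ | ⟨r, rr⟩
        · rfl
        · exfalso; rw [hrle] at hhead; simp at hhead
      subst hrest
      simp only [pvPushRun, List.foldl_nil, List.foldl_cons]
      by_cases ha : c = 'a'
      · subst ha; rw [pvStepA_a, pvStepB_a]; simp; omega
      · by_cases hb : c = 'b'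
        · subst hb
          by_cases hp : p0 = some 'b'
          · have hbq : b0 = q0 := hH ⟨hp, rfl⟩
            subst hp; rw [pvStepA_b_skip, pvStepB_b]; simp [hbq]
          · rw [pvStepA_b_fire _ _ _ _ hp, pvStepB_b]
        · rw [pvStepA_other _ _ _ _ _ ha hb, pvStepB_other _ _ _ _ ha hb]
    · -- rest starts with char d
      have hd : rest.head? = some d := by
        rw [hrle] at hhead
        cases hh : rest.head? with
        | none => rw [hh] at hhead; simp at hhead
        | some r => rw [hh] at hhead; simp at hhead; rw [hhead]
      by_cases ha : c = 'a'
      · subst ha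
        rw [pvStepA_a]
        have hih := ih (some 'a') b0 (a0 + 1) (q0 + 1 + b0)
          (fun h => by simp at h)
        rw [hrle] at hih
        rw [hih]
        simp only [pvPushRun]
        by_cases hcd : 'a' = d
        · subst hcd
          simp only [if_true, List.foldl_cons, pvStepB_a]
          have : q0 + 1 + b0 + n * (1 + b0) = q0 + (n + 1) * (1 + b0) := by ring
          rw [this]
        · simp only [if_neg hcd, List.foldl_cons, pvStepB_a]
          have : q0 + 1 + b0 = q0 + 1 * (1 + b0) := by ring
          rw [this]
      · by_cases hb : c = 'b'
        · subst hb
          by_cases hp : p0 = some 'b'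
          · have hbq : b0 = q0 := hH ⟨hp, rfl⟩
            subst hp
            rw [pvStepA_b_skip]
            have hih := ih (some 'b') b0 a0 q0 (fun _ => hbq)
            rw [hrle] at hih
            rw [hih]
            simp only [pvPushRun]
            by_cases hcd : 'b' = d
            · subst hcd
              simp only [if_true, List.foldl_cons, pvStepB_b]
            · simp only [if_neg hcd, List.foldl_cons, pvStepB_b, hbq]
          · rw [pvStepA_b_fire _ _ _ _ hp]
            have hih := ih (some 'b') q0 0 q0 (fun _ => rfl)
            rw [hrle] at hih
            rw [hih]
            simp only [pvPushRun]
            by_cases hcd : 'b' = d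
            · subst hcd
              simp only [if_true, List.foldl_cons, pvStepB_b]
            · simp only [if_neg hcd, List.foldl_cons, pvStepB_b]
        · rw [pvStepA_other _ _ _ _ _ ha hb]
          have hih := ih (some c) b0 a0 q0
            (fun h => absurd (by injection h.1) (by simpa using hb))
          rw [hrle] at hih
          rw [hih]
          simp only [pvPushRun]
          by_cases hcd : c = d
          · subst hcd
            simp only [if_true, List.foldl_cons,
              pvStepB_other _ _ _ _ ha hb]
          · simp only [if_neg hcd, List.foldl_cons,
              pvStepB_other _ _ _ _ ha hb]

-- ===== VERDICT (by name: the statement is the Claim_ definition above) =====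
theorem count_strictly_increasing_sequences_spec : Claim_equal_count_strictly_increasing_sequences := by
  intro s _
  unfold Spec_count_strictly_increasing_sequences
  unfold count_strictly_increasing_sequences count_strictly_increasing_sequences_alt
  simp only [PySem.Str.len_eq]
  have hget : ∀ (st : Option Char × Int × Int × Int) (i : Int),
      (match PySem.Str.pyGet? s i with
        | some c => pvStepA st c
        | none => st)
      = (match PySem.List.pyGet? s.toList i with
        | some c => pvStepA st c
        | none => st) := by
    intro st i
    have h : PySem.Str.pyGet? s i = PySem.List.pyGet? s.toList i := by
      simp [PySem.Str.pyGet?]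
    rw [h]
  rw [PySem.List.foldl_congr_mem _ _ _ _ (fun st i _ => hget st i)]
  rw [pvIndexLoop s.toList ((none : Option Char), (0:Int), (0:Int), (0:Int))]
  rw [pvFoldl_pushRun]
  have hM := pvMain s.toList.reverse none 0 0 0 (fun h => by simp at h)
  rw [← congrArg Prod.snd hM]
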